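-- pv_equiv track=rewrite | github.com/ProteinDesignLab/protpardelle-1c | src/protpardelle/data/motif.py | motif_placement_to_motif_idx
-- ===== SOURCE A (Python) =====
-- def motif_placement_to_motif_idx(
--     motif_placement: str, motif_id_to_length: dict[str, int]
-- ) -> list[int]:
--     """
--     Convert a motif placement string to 0-indexed motif index
--     Also need a mapping from motif segment id to motif segment length
--
--     E.g. "12/B/40/A/41" -> [12, 13, 14, 55, 56, 57, 58]
--     """
--     motif_idx = []
--
--     curr_idx = 0
--
--     for s in motif_placement.split("/"):
--         if s.isalpha():  # motif segment
--             motif_length = motif_id_to_length[s]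
--             m_idx = list(range(curr_idx, curr_idx + motif_length))
--             motif_idx.extend(m_idx)
--             curr_idx += motif_length
--         else:  # scaffold segment
--             curr_idx += int(s)
--
--     return motif_idx
-- ===== SOURCE B (Python) =====
-- def motif_placement_to_motif_idx(motif_placement, motif_id_to_length):
--     segs = motif_placement.split("/")
--     advances = [(s.isalpha(), motif_id_to_length[s] if s.isalpha() else int(s))
--                 for s in segs]
--     starts = [0]
--     for _, adv in advances:
--         starts.append(starts[-1] + adv)
--     return [i for (is_motif, adv), start in zip(advances, starts) if is_motif
--             for i in range(start, start + adv)]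
-- ===== Notes on version B (the rewrite author's own statement) =====
-- stated objective: alternative
-- what changed: B replaces A's single loop that interleaves index accumulation with output extension by a two-pass decomposition: classify each segment into (is_motif, advance), build a prefix-sum table of start offsets, then emit the ranges for motif segments in one comprehension.
import Mathlib
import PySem

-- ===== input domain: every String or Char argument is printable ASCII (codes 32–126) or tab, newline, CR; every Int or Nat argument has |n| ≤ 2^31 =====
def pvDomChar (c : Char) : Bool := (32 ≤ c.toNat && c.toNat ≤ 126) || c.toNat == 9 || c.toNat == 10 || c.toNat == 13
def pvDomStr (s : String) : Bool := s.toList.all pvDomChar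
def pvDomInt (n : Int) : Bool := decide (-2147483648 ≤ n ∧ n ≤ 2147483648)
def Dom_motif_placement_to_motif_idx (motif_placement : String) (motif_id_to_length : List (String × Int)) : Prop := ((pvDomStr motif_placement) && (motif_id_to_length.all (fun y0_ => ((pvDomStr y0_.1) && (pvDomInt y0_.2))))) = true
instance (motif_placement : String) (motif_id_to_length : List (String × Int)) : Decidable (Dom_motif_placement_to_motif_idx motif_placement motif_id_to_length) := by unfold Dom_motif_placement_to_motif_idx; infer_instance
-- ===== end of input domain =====

-- B restructures A's single accumulate-and-extend loop into a two-pass decomposition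
-- (classify segments, prefix-sum the start offsets, then emit the motif ranges); same cost.

-- Python dict lookup d[s] (first match in the insertion-order association list); none = KeyError
def pvLookup? (d : List (String × Int)) (s : String) : Option Int :=
  (d.find? (fun p => p.1 == s)).map (·.2)

-- ===== PORT A =====
def motif_placement_to_motif_idx (motif_placement : String) (motif_id_to_length : List (String × Int)) : List Int :=
  ((((PySem.Str.split? motif_placement "/").getD [])).foldl
    (fun (acc : List Int × Int) s =>
      if PySem.Str.strIsalpha s then
        -- motif segment: KeyError excluded by Pre_, so getD's default is never used
        let motif_length := (pvLookup? motif_id_to_length s).getD 0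
        (acc.1 ++ PySem.List.pyRange acc.2 (acc.2 + motif_length) 1, acc.2 + motif_length)
      else
        -- scaffold segment: ValueError of int(s) excluded by Pre_
        (acc.1, acc.2 + (PySem.Int.ofStr? s).getD 0))
    ([], 0)).1

-- ===== PORT B =====
def motif_placement_to_motif_idx_alt (motif_placement : String) (motif_id_to_length : List (String × Int)) : List Int :=
  let segs := ((PySem.Str.split? motif_placement "/").getD [])
  let advances := segs.map (fun s =>
    (PySem.Str.strIsalpha s,
     if PySem.Str.strIsalpha s then (pvLookup? motif_id_to_length s).getD 0
     else (PySem.Int.ofStr? s).getD 0))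
  -- starts = [0]; for _, adv in advances: starts.append(starts[-1] + adv)
  let starts := advances.foldl (fun (st : List Int) p => st ++ [st.getLastD 0 + p.2]) [0]
  (advances.zip starts).flatMap (fun q =>
    if q.1.1 then PySem.List.pyRange q.2 (q.2 + q.1.2) 1 else [])

-- ===== PRECONDITION & SPEC =====
-- Pre_ excludes exactly the inputs where Python A raises: a segment that is alphabetic but
-- missing from the dict (KeyError), or a non-alphabetic segment int() cannot parse (ValueError).
def Pre_motif_placement_to_motif_idx (motif_placement : String) (motif_id_to_length : List (String × Int)) : Prop :=
  ∀ s ∈ ((PySem.Str.split? motif_placement "/").getD []),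
    if PySem.Str.strIsalpha s then (pvLookup? motif_id_to_length s).isSome = true
    else (PySem.Int.ofStr? s).isSome = true
instance (motif_placement : String) (motif_id_to_length : List (String × Int)) : Decidable (Pre_motif_placement_to_motif_idx motif_placement motif_id_to_length) := by unfold Pre_motif_placement_to_motif_idx; infer_instance

def pvWitness_motif_placement_to_motif_idx : String × (List (String × Int)) := ("2/A/3", [("A", 2)])

def Spec_motif_placement_to_motif_idx (motif_placement : String) (motif_id_to_length : List (String × Int)) (out : List Int) : Prop := out = motif_placement_to_motif_idx_alt motif_placement motif_id_to_length
instance (motif_placement : String) (motif_id_to_length : List (String × Int)) (out : List Int) : Decidable (Spec_motif_placement_to_motif_idx motif_placement motif_id_to_length out) := by unfold Spec_motif_placement_to_motif_idx; infer_instance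

-- ===== CLAIM (what is proved, stated in full; the proofs are below) =====
def Claim_equal_motif_placement_to_motif_idx : Prop := ∀ (motif_placement : String) (motif_id_to_length : List (String × Int)), Dom_motif_placement_to_motif_idx motif_placement motif_id_to_length → Pre_motif_placement_to_motif_idx motif_placement motif_id_to_length → Spec_motif_placement_to_motif_idx motif_placement motif_id_to_length (motif_placement_to_motif_idx motif_placement motif_id_to_length)

-- ===== LEMMAS AND PROOFS =====

-- the start offset of each segment, as a list (tail of the prefix sums of the advances)
def pvTailStarts (c : Int) : List (Bool × Int) → List Int
  | [] => []
  | p :: ps => (c + p.2) :: pvTailStarts (c + p.2) ps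

theorem pvStarts_fold (adv : List (Bool × Int)) :
    ∀ (st : List Int) (c : Int),
      adv.foldl (fun (st : List Int) p => st ++ [st.getLastD 0 + p.2]) (st ++ [c])
        = (st ++ [c]) ++ pvTailStarts c adv := by
  induction adv with
  | nil => intro st c; simp [pvTailStarts]
  | cons p ps ih =>
    intro st c
    have h1 : (st ++ [c]).getLastD 0 = c := by simp
    simp only [List.foldl_cons, h1, pvTailStarts]
    have := ih (st ++ [c]) (c + p.2)
    simpa using this

theorem pvMain (d : List (String × Int)) (segs : List String) :
    ∀ (acc : List Int) (c : Int),
      (segs.foldl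
        (fun (a : List Int × Int) s =>
          if PySem.Str.strIsalpha s then
            let motif_length := (pvLookup? d s).getD 0
            (a.1 ++ PySem.List.pyRange a.2 (a.2 + motif_length) 1, a.2 + motif_length)
          else (a.1, a.2 + (PySem.Int.ofStr? s).getD 0)) (acc, c)).1
      = acc ++
        (((segs.map (fun s =>
            (PySem.Str.strIsalpha s,
             if PySem.Str.strIsalpha s then (pvLookup? d s).getD 0
             else (PySem.Int.ofStr? s).getD 0))).zip
          (c :: pvTailStarts c (segs.map (fun s =>
            (PySem.Str.strIsalpha s,
             if PySem.Str.strIsalpha s then (pvLookup? d s).getD 0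
             else (PySem.Int.ofStr? s).getD 0))))).flatMap (fun q =>
            if q.1.1 then PySem.List.pyRange q.2 (q.2 + q.1.2) 1 else [])) := by
  induction segs with
  | nil => intro acc c; simp [pvTailStarts]
  | cons s ss ih =>
    intro acc c
    by_cases h : PySem.Str.strIsalpha s = true
    · simp only [List.foldl_cons, List.map_cons, h, if_true, pvTailStarts, List.zip_cons_cons,
        List.flatMap_cons]
      rw [ih]
      simp
    · simp only [List.foldl_cons, List.map_cons, h, if_false, Bool.false_eq_true, pvTailStarts,
        List.zip_cons_cons, List.flatMap_cons]
      rw [ih]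
      simp

-- ===== VERDICT (by name: the statement is the Claim_ definition above) =====
theorem motif_placement_to_motif_idx_spec : Claim_equal_motif_placement_to_motif_idx := by
  intro mp d _ _
  unfold Spec_motif_placement_to_motif_idx motif_placement_to_motif_idx motif_placement_to_motif_idx_alt
  have hst := pvStarts_fold
    (((PySem.Str.split? mp "/").getD []).map (fun s =>
      (PySem.Str.strIsalpha s,
       if PySem.Str.strIsalpha s then (pvLookup? d s).getD 0
       else (PySem.Int.ofStr? s).getD 0))) [] 0
  simp only [List.nil_append, List.singleton_append] at hst
  dsimp only
  rw [pvMain d ((PySem.Str.split? mp "/").getD []) [] 0, List.nil_append, hst]
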